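-- pv_equiv track=rewrite | github.com/ThibeHanssens/CTF_49 | CSCBE/CSCB thibe/Cryptography/shit/xor_known_plaintext_attack.py | get_key_length
-- ===== SOURCE A (Python) =====
-- def get_key_length(data, max_len=40):
--     best_len = 0
--     max_score = 0
--     for l in range(1, max_len):
--         score = 0
--         for i in range(len(data) - l):
--             if data[i] == data[i+l]:
--                 score += 1
--         if score > max_score:
--             max_score = score
--             best_len = l
--     return best_len
-- ===== SOURCE B (Python) =====
-- def get_key_length(data, max_len=40):
--     # One pass over positions: tally every matching pair (i, j) with gap
--     # j - i < max_len into a dict of gap -> score, then scan the gaps once.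
--     n = len(data)
--     scores = {}
--     for i in range(n):
--         for j in range(i + 1, min(n, i + max_len)):
--             if data[i] == data[j]:
--                 scores[j - i] = scores.get(j - i, 0) + 1
--     best_len = 0
--     max_score = 0
--     for l in range(1, max_len):
--         s = scores.get(l, 0)
--         if s > max_score:
--             max_score = s
--             best_len = l
--     return best_len
-- ===== Notes on version B (the rewrite author's own statement) =====
-- stated objective: alternative
-- what changed: A rescans the whole list once per candidate shift; B makes a single pass over positions, tallying every matching pair within the max_len window into a gap->score dict, and then picks the best shift in one scan of that dict.
import Mathlib
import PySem

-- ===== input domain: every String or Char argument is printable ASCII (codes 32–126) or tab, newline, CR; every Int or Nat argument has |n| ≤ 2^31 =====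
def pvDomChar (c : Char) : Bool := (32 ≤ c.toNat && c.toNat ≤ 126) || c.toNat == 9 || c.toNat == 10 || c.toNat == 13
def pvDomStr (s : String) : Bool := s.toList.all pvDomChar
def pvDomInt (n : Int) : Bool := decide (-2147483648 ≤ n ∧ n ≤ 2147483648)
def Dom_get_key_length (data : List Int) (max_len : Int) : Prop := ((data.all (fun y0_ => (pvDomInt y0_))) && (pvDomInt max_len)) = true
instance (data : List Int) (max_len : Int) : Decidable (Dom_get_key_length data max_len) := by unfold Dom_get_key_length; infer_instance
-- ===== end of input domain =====

-- B replaces A's per-shift rescans by one pass over positions that tallies matching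
-- pairs within the window into a gap→score dict, then a single selection scan (alternative decomposition).

-- ===== PORT A =====
def get_key_length (data : List Int) (max_len : Int) : Int :=
  let st := (PySem.List.pyRange 1 max_len 1).foldl (fun (st : Int × Int) l =>
    let score := (PySem.List.pyRange 0 ((data.length : Int) - l) 1).foldl
      (fun s i =>
        if PySem.List.pyGetD data i 0 = PySem.List.pyGetD data (i + l) 0 then s + 1 else s) 0
    if score > st.2 then (l, score) else st) (0, 0)
  st.1

-- ===== PORT B =====
def get_key_length_alt (data : List Int) (max_len : Int) : Int :=
  let n : Int := (data.length : Int)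
  let scores : PySem.Dict Int Int :=
    (PySem.List.pyRange 0 n 1).foldl (fun d i =>
      (PySem.List.pyRange (i + 1) (min n (i + max_len)) 1).foldl (fun d j =>
        if PySem.List.pyGetD data i 0 = PySem.List.pyGetD data j 0
        then d.modify (j - i) 0 (· + 1) else d) d) PySem.Dict.empty
  let st := (PySem.List.pyRange 1 max_len 1).foldl (fun (st : Int × Int) l =>
    let s := scores.getD l 0
    if s > st.2 then (l, s) else st) (0, 0)
  st.1

-- ===== PRECONDITION & SPEC =====
def Spec_get_key_length (data : List Int) (max_len : Int) (out : Int) : Prop := out = get_key_length_alt data max_len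
instance (data : List Int) (max_len : Int) (out : Int) : Decidable (Spec_get_key_length data max_len out) := by unfold Spec_get_key_length; infer_instance

-- ===== CLAIM (what is proved, stated in full; the proofs are below) =====
def Claim_equal_get_key_length : Prop := ∀ (data : List Int) (max_len : Int), Dom_get_key_length data max_len → Spec_get_key_length data max_len (get_key_length data max_len)

-- ===== LEMMAS AND PROOFS =====
-- ===== LEMMAS AND PROOFS =====

-- counting fold: 'score += 1' loop is a countP
theorem pvFoldlCount (q : Int → Prop) [DecidablePred q] :
    ∀ (xs : List Int) (s : Int),
      xs.foldl (fun s i => if q i then s + 1 else s) s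
        = s + ((xs.countP (fun i => decide (q i)) : Nat) : Int) := by
  intro xs
  induction xs with
  | nil => intro s; simp
  | cons x xs ih =>
    intro s
    simp only [List.foldl_cons, List.countP_cons, ih]
    by_cases h : q x
    · simp only [h, decide_true, if_pos]
      push_cast
      ring
    · simp [h]

-- conditional modify fold = plain modify fold over the filtered, mapped list
theorem pvFoldlModIf (q : Int → Prop) [DecidablePred q] (g : Int → Int) :
    ∀ (xs : List Int) (d : PySem.Dict Int Int),
      xs.foldl (fun d j => if q j then d.modify (g j) 0 (· + 1) else d) d
        = ((xs.filter (fun j => decide (q j))).map g).foldl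
            (fun d x => d.modify x 0 (· + 1)) d := by
  intro xs
  induction xs with
  | nil => intro d; rfl
  | cons x xs ih =>
    intro d
    by_cases h : q x <;> simp [h, ih]

-- nested tally loop = one modify fold over the flatMap of per-i gap lists
theorem pvNested (q2 : Int → Int → Prop) [inst : ∀ i, DecidablePred (q2 i)]
    (W : Int → List Int) :
    ∀ (is : List Int) (d : PySem.Dict Int Int),
      is.foldl (fun d i =>
          (W i).foldl (fun d j => if q2 i j then d.modify (j - i) 0 (· + 1) else d) d) d
        = (is.flatMap (fun i =>
              ((W i).filter (fun j => decide (q2 i j))).map (· - i))).foldl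
            (fun d x => d.modify x 0 (· + 1)) d := by
  intro is
  induction is with
  | nil => intro d; rfl
  | cons i is ih =>
    intro d
    simp only [List.foldl_cons, List.flatMap_cons, List.foldl_append]
    rw [pvFoldlModIf (q2 i) (· - i) (W i) d, ih]

theorem pvCountFlat (L : Int → List Int) (l : Int) :
    ∀ (is : List Int),
      (is.flatMap L).count l = (is.map (fun i => (L i).count l)).sum := by
  intro is
  induction is with
  | nil => rfl
  | cons i is ih => simp [List.flatMap_cons, List.count_append, ih]

-- a countP whose predicate pins the element down to one value, over a Nodup list
theorem pvCountPUnique (c : Int) (q : Int → Prop) [DecidablePred q] (xs : List Int)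
    (h : xs.Nodup) :
    xs.countP (fun j => (j == c) && decide (q j)) = if c ∈ xs ∧ q c then 1 else 0 := by
  by_cases hq : q c
  · have : ∀ j ∈ xs, ((j == c) && decide (q j)) = (j == c) := by
      intro j _
      by_cases hj : j = c
      · subst hj; simp [hq]
      · simp [hj]
    rw [List.countP_congr (fun j hj => by rw [this j hj])]
    by_cases hc : c ∈ xs
    · simp only [hc, hq, and_true, if_true]
      have := List.count_eq_one_of_mem h hc
      simpa [List.count] using this
    · simp only [hc, false_and, if_false]
      have := List.count_eq_zero_of_not_mem (a := c) hc
      simpa [List.count] using this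
  · have : ∀ j ∈ xs, ((j == c) && decide (q j)) = false := by
      intro j _
      by_cases hj : j = c
      · subst hj; simp [hq]
      · simp [hj]
    rw [List.countP_congr (fun j hj => by rw [this j hj])]
    rw [List.countP_false, if_neg (fun hc => hq hc.2)]
    rfl

-- the per-position gap list contains l exactly when the partner i + l is in the window and matches
theorem pvCountWindow (a b i l : Int) (q : Int → Prop) [DecidablePred q] :
    (((PySem.List.pyRange a b 1).filter (fun j => decide (q j))).map (· - i)).count l
      = if a ≤ i + l ∧ i + l < b ∧ q (i + l) then 1 else 0 := by
  have h1 : (((PySem.List.pyRange a b 1).filter (fun j => decide (q j))).map (· - i)).count l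
      = ((PySem.List.pyRange a b 1).filter (fun j => decide (q j))).countP
          (fun j => (j - i == l)) := by
    simp only [List.count, List.countP_map]
    rfl
  rw [h1, List.countP_filter]
  have h2 : ∀ j ∈ PySem.List.pyRange a b 1,
      ((j - i == l) && decide (q j)) = ((j == i + l) && decide (q j)) := by
    intro j _
    by_cases hj : j = i + l
    · subst hj
      have e : (i + l - i == l) = true := by simp
      rw [e, beq_self_eq_true]
    · have h3 : (j - i == l) = false := beq_eq_false_iff_ne.mpr (by omega)
      have h4 : (j == i + l) = false := beq_eq_false_iff_ne.mpr hj
      rw [h3, h4]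
  rw [List.countP_congr (fun j hj => by rw [h2 j hj]),
      pvCountPUnique (i + l) q _ (PySem.List.nodup_pyRange_one a b)]
  by_cases hm : a ≤ i + l ∧ i + l < b ∧ q (i + l)
  · rw [if_pos ⟨PySem.List.mem_pyRange_one.mpr ⟨hm.1, hm.2.1⟩, hm.2.2⟩, if_pos hm]
  · rw [if_neg, if_neg hm]
    rw [PySem.List.mem_pyRange_one]
    tauto

theorem pvSumIndicator (c : Int → Prop) [DecidablePred c] :
    ∀ (is : List Int),
      (is.map (fun i => if c i then (1 : Nat) else 0)).sum
        = is.countP (fun i => decide (c i)) := by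
  intro is
  induction is with
  | nil => rfl
  | cons i is ih =>
    by_cases h : c i <;> simp [h, ih, Nat.add_comm]

-- restricting the full position range by 'i + l < n' is the same as ranging over [0, n - l)
theorem pvRangeRestrict (n l : Int) (hl : 1 ≤ l) (q : Int → Prop)
    [DecidablePred q] :
    (PySem.List.pyRange 0 n 1).countP (fun i => decide (i + l < n ∧ q i))
      = (PySem.List.pyRange 0 (n - l) 1).countP (fun i => decide (q i)) := by
  by_cases hnl : n - l ≤ 0
  · rw [PySem.List.pyRange_one_eq_nil hnl]
    simp only [List.countP_nil]
    rw [List.countP_eq_zero]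
    intro i hi
    rw [PySem.List.mem_pyRange_one] at hi
    simp only [decide_eq_true_eq, not_and]
    intro h
    omega
  · rw [not_le] at hnl
    rw [PySem.List.pyRange_one_append 0 (n - l) n (by omega) (by omega),
        List.countP_append]
    have e1 : (PySem.List.pyRange 0 (n - l) 1).countP (fun i => decide (i + l < n ∧ q i))
        = (PySem.List.pyRange 0 (n - l) 1).countP (fun i => decide (q i)) := by
      apply List.countP_congr
      intro i hi
      rw [PySem.List.mem_pyRange_one] at hi
      have : i + l < n := by omega
      simp [this]
    have e2 : (PySem.List.pyRange (n - l) n 1).countP (fun i => decide (i + l < n ∧ q i)) = 0 := by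
      rw [List.countP_eq_zero]
      intro i hi
      rw [PySem.List.mem_pyRange_one] at hi
      simp only [decide_eq_true_eq, not_and]
      intro h
      omega
    rw [e1, e2]
    omega

-- the key lemma: B's dict score at gap l equals A's rescanned score for shift l
theorem pvScore (data : List Int) (max_len l : Int) (h1 : 1 ≤ l) (h2 : l < max_len) :
    (((PySem.List.pyRange 0 (data.length : Int) 1).foldl (fun d i =>
        (PySem.List.pyRange (i + 1) (min (data.length : Int) (i + max_len)) 1).foldl
          (fun d j =>
            if PySem.List.pyGetD data i 0 = PySem.List.pyGetD data j 0
            then d.modify (j - i) 0 (· + 1) else d) d)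
        PySem.Dict.empty).getD l 0 : Int)
      = (((PySem.List.pyRange 0 ((data.length : Int) - l) 1).countP
            (fun i => decide (PySem.List.pyGetD data i 0 = PySem.List.pyGetD data (i + l) 0)) : Nat) : Int) := by
  rw [pvNested (fun i j => PySem.List.pyGetD data i 0 = PySem.List.pyGetD data j 0)
        (fun i => PySem.List.pyRange (i + 1) (min (data.length : Int) (i + max_len)) 1),
      PySem.Dict.getD_foldl_modify_add_one, PySem.Dict.getD_empty,
      pvCountFlat, zero_add]
  congr 1
  have e1 : ∀ i : Int,
      ((((PySem.List.pyRange (i + 1) (min (data.length : Int) (i + max_len)) 1).filter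
          (fun j => decide (PySem.List.pyGetD data i 0 = PySem.List.pyGetD data j 0))).map
          (· - i)).count l)
        = if i + l < (data.length : Int) ∧
            PySem.List.pyGetD data i 0 = PySem.List.pyGetD data (i + l) 0 then 1 else 0 := by
    intro i
    rw [pvCountWindow]
    congr 1
    simp only [eq_iff_iff]
    constructor
    · rintro ⟨_, hb, hq⟩; exact ⟨by omega, hq⟩
    · rintro ⟨ha, hq⟩; exact ⟨by omega, by omega, hq⟩
  calc ((PySem.List.pyRange 0 (data.length : Int) 1).map
          (fun i => ((((PySem.List.pyRange (i + 1) (min (data.length : Int) (i + max_len)) 1).filter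
            (fun j => decide (PySem.List.pyGetD data i 0 = PySem.List.pyGetD data j 0))).map
            (· - i)).count l))).sum
      = ((PySem.List.pyRange 0 (data.length : Int) 1).map
          (fun i => if i + l < (data.length : Int) ∧
              PySem.List.pyGetD data i 0 = PySem.List.pyGetD data (i + l) 0 then (1 : Nat) else 0)).sum := by
        exact congrArg List.sum (List.map_congr_left (fun i _ => e1 i))
    _ = (PySem.List.pyRange 0 (data.length : Int) 1).countP
          (fun i => decide (i + l < (data.length : Int) ∧
            PySem.List.pyGetD data i 0 = PySem.List.pyGetD data (i + l) 0)) :=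
        pvSumIndicator _ _
    _ = (PySem.List.pyRange 0 ((data.length : Int) - l) 1).countP
          (fun i => decide (PySem.List.pyGetD data i 0 = PySem.List.pyGetD data (i + l) 0)) :=
        pvRangeRestrict _ l h1 _

-- ===== VERDICT (by name: the statement is the Claim_ definition above) =====
theorem get_key_length_spec : Claim_equal_get_key_length := by
  intro data max_len _dom
  unfold Spec_get_key_length get_key_length get_key_length_alt
  refine congrArg Prod.fst ?_
  apply PySem.List.foldl_congr_mem
  intro st l hl
  rw [PySem.List.mem_pyRange_one] at hl
  rw [pvScore data max_len l hl.1 hl.2,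
      pvFoldlCount (fun i => PySem.List.pyGetD data i 0 = PySem.List.pyGetD data (i + l) 0),
      zero_add]
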